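-- pv_equiv track=rewrite | github.com/Groux0705/foreign-magazine-grab-daily | extractor.py | _has_bad_token
-- ===== SOURCE A (Python) =====
-- BAD_TOKENS = {
--     "ad", "ads", "advert", "advertisement", "promo", "promotion",
--     "recommend", "recommended", "recommendations", "related",
--     "newsletter", "subscribe", "subscription", "social", "share",
--     "comments", "comment", "video", "paywall", "sponsored", "sponsor",
--     "outbrain", "taboola", "toolbar", "breadcrumb", "breadcrumbs",
--     "author-bio", "author-card", "inline-signup",
-- }
--
-- def _token_set(value: str) -> set[str]:
--     if not value:
--         return set()
--     out: set[str] = set()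
--     for token in value.split():
--         token = token.strip().lower()
--         if token:
--             out.add(token)
--     return out
--
-- def _has_bad_token(value: str) -> bool:
--     if not value:
--         return False
--     tokens = _token_set(value)
--     if tokens & BAD_TOKENS:
--         return True
--     for t in tokens:
--         parts = t.split("-")
--         if any(p in {"ad", "ads", "advert", "promo"} and i == 0 for i, p in enumerate(parts)):
--             return True
--         for bad in ("related", "newsletter", "paywall", "sponsored", "taboola",
--                     "outbrain", "recommend", "share", "social-share"):
--             if bad in parts:
--                 return True
--     return False
-- ===== SOURCE B (Python) =====
-- BAD_TOKENS = {
--     "ad", "ads", "advert", "advertisement", "promo", "promotion",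
--     "recommend", "recommended", "recommendations", "related",
--     "newsletter", "subscribe", "subscription", "social", "share",
--     "comments", "comment", "video", "paywall", "sponsored", "sponsor",
--     "outbrain", "taboola", "toolbar", "breadcrumb", "breadcrumbs",
--     "author-bio", "author-card", "inline-signup",
-- }
--
--
-- def _has_bad_token(value: str) -> bool:
--     for token in value.split():
--         t = token.lower()
--         if t in BAD_TOKENS:
--             return True
--         parts = t.split("-")
--         if parts[0] in ("ad", "ads", "advert", "promo"):
--             return True
--         if any(p in ("related", "newsletter", "paywall", "sponsored", "taboola",
--                      "outbrain", "recommend", "share", "social-share") for p in parts):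
--             return True
--     return False
-- ===== Notes on version B (the rewrite author's own statement) =====
-- stated objective: simpler
-- what changed: B replaces A's three sub-passes (build a deduplicated token set, intersect it with BAD_TOKENS, then loop over the set again for the hyphen-part checks) with one early-exit loop over value.split() that tests each lowercased token directly, dropping the helper, the set construction and the redundant strip/empty checks.
import Mathlib
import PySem

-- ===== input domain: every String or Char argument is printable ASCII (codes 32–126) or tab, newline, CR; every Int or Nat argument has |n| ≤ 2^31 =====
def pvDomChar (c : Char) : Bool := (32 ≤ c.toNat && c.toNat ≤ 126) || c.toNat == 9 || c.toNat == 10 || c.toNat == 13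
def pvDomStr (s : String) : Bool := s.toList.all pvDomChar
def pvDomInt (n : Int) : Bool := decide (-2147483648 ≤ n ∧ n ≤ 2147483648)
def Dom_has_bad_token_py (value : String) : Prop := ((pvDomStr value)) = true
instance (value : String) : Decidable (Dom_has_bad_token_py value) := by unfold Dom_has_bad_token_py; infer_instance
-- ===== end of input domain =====

-- B folds A's three passes (token-set build, set∩BAD_TOKENS, per-token hyphen scan) into one early-exit loop over value.split(); objective: simpler.


-- ===== PORT A =====
-- module constant BAD_TOKENS (a Python set literal)
def pvBadTokens : PySem.Set String := PySem.Set.ofList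
  ["ad", "ads", "advert", "advertisement", "promo", "promotion",
   "recommend", "recommended", "recommendations", "related",
   "newsletter", "subscribe", "subscription", "social", "share",
   "comments", "comment", "video", "paywall", "sponsored", "sponsor",
   "outbrain", "taboola", "toolbar", "breadcrumb", "breadcrumbs",
   "author-bio", "author-card", "inline-signup"]

-- helper _token_set: build the deduplicated set of stripped, lowercased tokens
def token_set_py (value : String) : PySem.Set String :=
  if value == "" then PySem.Set.empty
  else
    (PySem.Str.split₀ value).foldl
      (fun out token =>
        let token := PySem.Str.lower (PySem.Str.strip token)
        if token ≠ "" then PySem.Set.add out token else out)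
      PySem.Set.empty

-- the per-token loop of A ('for t in tokens: …'; its Bool result is order-independent, so
-- iterating the Set as a list is exact). t.split("-"): sep is the nonempty literal "-", so
-- split? is always 'some'; '.getD []' only discharges the Option.
def has_bad_token_py_loop : List String → Bool
  | [] => false
  | t :: rest =>
    let parts := (PySem.Str.split? t "-").getD []
    if (PySem.List.enumerate parts 0).any
         (fun ip => PySem.Set.contains (PySem.Set.ofList ["ad", "ads", "advert", "promo"]) ip.2 && ip.1 == 0) then
      true
    else if (["related", "newsletter", "paywall", "sponsored", "taboola",
              "outbrain", "recommend", "share", "social-share"] : List String).any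
              (fun bad => parts.contains bad) then
      true
    else has_bad_token_py_loop rest

def has_bad_token_py (value : String) : Bool :=
  if value == "" then false
  else
    let tokens := token_set_py value
    if !(PySem.Set.inter tokens pvBadTokens).isEmpty then true
    else has_bad_token_py_loop tokens

-- ===== PORT B =====
def has_bad_token_py_alt (value : String) : Bool :=
  (PySem.Str.split₀ value).any (fun token =>
    let t := PySem.Str.lower token
    if PySem.Set.contains pvBadTokens t then true
    else
      let parts := (PySem.Str.split? t "-").getD []   -- sep "-" nonempty: split? is always 'some'
      if (match PySem.List.pyGet? parts (0 : Int) with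
          | some p => (["ad", "ads", "advert", "promo"] : List String).contains p
          | none => false) then true
      else parts.any (fun p =>
        (["related", "newsletter", "paywall", "sponsored", "taboola",
          "outbrain", "recommend", "share", "social-share"] : List String).contains p))

-- ===== PRECONDITION & SPEC =====
def Spec_has_bad_token_py (value : String) (out : Bool) : Prop := out = has_bad_token_py_alt value
instance (value : String) (out : Bool) : Decidable (Spec_has_bad_token_py value out) := by unfold Spec_has_bad_token_py; infer_instance

-- ===== CLAIM (what is proved, stated in full; the proofs are below) =====
def Claim_equal_has_bad_token_py : Prop := ∀ (value : String), Dom_has_bad_token_py value → Spec_has_bad_token_py value (has_bad_token_py value)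

-- ===== LEMMAS AND PROOFS =====

-- tokens produced by str.split() are nonempty and contain no whitespace
def pvOkTok (t : List Char) : Prop := t ≠ [] ∧ ∀ c ∈ t, PySem.Chars.isspace c = false

theorem split₀_go_ok (s : List Char) : ∀ (cur : List Char) (acc : List (List Char)),
    (∀ c ∈ cur, PySem.Chars.isspace c = false) → (∀ t ∈ acc, pvOkTok t) →
    ∀ t ∈ PySem.Chars.split₀.go s cur acc, pvOkTok t := by
  induction s with
  | nil =>
    intro cur acc hcur hacc t ht
    simp only [PySem.Chars.split₀.go] at ht
    by_cases hc : cur.isEmpty = true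
    · rw [if_pos hc] at ht
      exact hacc t (List.mem_reverse.mp ht)
    · rw [if_neg hc] at ht
      rcases List.mem_cons.mp (List.mem_reverse.mp ht) with ht | ht
      · subst ht
        refine ⟨by simpa [List.isEmpty_iff] using hc, ?_⟩
        intro c hcmem; exact hcur c (List.mem_reverse.mp hcmem)
      · exact hacc t ht
  | cons c rest ih =>
    intro cur acc hcur hacc t ht
    simp only [PySem.Chars.split₀.go] at ht
    by_cases hs : PySem.Chars.isspace c = true
    · by_cases hc : cur.isEmpty = true
      · rw [if_pos hs, if_pos hc] at ht
        exact ih [] acc (by simp) hacc t ht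
      · rw [if_pos hs, if_neg hc] at ht
        refine ih [] (cur.reverse :: acc) (by simp) ?_ t ht
        intro u hu
        rcases List.mem_cons.mp hu with hu | hu
        · subst hu
          refine ⟨by simpa [List.isEmpty_iff] using hc, ?_⟩
          intro d hd; exact hcur d (List.mem_reverse.mp hd)
        · exact hacc u hu
    · rw [if_neg hs] at ht
      refine ih (c :: cur) acc ?_ hacc t ht
      intro d hd
      rcases List.mem_cons.mp hd with hd | hd
      · subst hd; simpa using hs
      · exact hcur d hd

theorem mem_split₀_ok (s : List Char) (t : List Char) (ht : t ∈ PySem.Chars.split₀ s) : pvOkTok t :=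
  split₀_go_ok s [] [] (by simp) (by simp) t ht

-- a whitespace-free list of chars is fixed by strip
theorem strip_of_ok (t : List Char) (h : ∀ c ∈ t, PySem.Chars.isspace c = false) :
    PySem.Chars.strip t = t := by
  have key : ∀ (u : List Char), (∀ c ∈ u, PySem.Chars.isspace c = false) →
      List.dropWhile PySem.Chars.isspace u = u := by
    intro u hu
    apply List.dropWhile_eq_self_iff.mpr
    intro hne
    exact by simpa using hu u[0] (List.getElem_mem hne)
  have hl : PySem.Chars.lstrip t = t := key t h
  have hr : PySem.Chars.rstrip t = t := by
    simp only [PySem.Chars.rstrip]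
    rw [key t.reverse (fun c hc => h c (List.mem_reverse.mp hc))]
    simp
  simp only [PySem.Chars.strip, hl, hr]

-- every token of Str.split₀ is nonempty and fixed by Str.strip
theorem mem_strSplit₀ (value token : String) (h : token ∈ PySem.Str.split₀ value) :
    PySem.Str.strip token = token ∧ token ≠ "" := by
  simp only [PySem.Str.split₀, List.mem_map] at h
  obtain ⟨t, ht, rfl⟩ := h
  obtain ⟨hne, hns⟩ := mem_split₀_ok value.toList t ht
  constructor
  · apply String.toList_injective
    rw [PySem.Str.toList_strip]
    simpa using strip_of_ok t hns
  · intro hcon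
    apply hne
    have := congrArg String.toList hcon
    simpa using this

-- the per-token predicate both programs decide, as a Prop
abbrev pvTokBad (t : String) : Prop :=
  t ∈ pvBadTokens ∨
  (∃ p, ((PySem.Str.split? t "-").getD []).head? = some p ∧
    p ∈ (["ad", "ads", "advert", "promo"] : List String)) ∨
  (∃ p ∈ (PySem.Str.split? t "-").getD [],
    p ∈ (["related", "newsletter", "paywall", "sponsored", "taboola",
          "outbrain", "recommend", "share", "social-share"] : List String))

-- B returns true iff some split token is bad after lowercasing
theorem alt_iff (value : String) :
    has_bad_token_py_alt value = true ↔
      ∃ token ∈ PySem.Str.split₀ value, pvTokBad (PySem.Str.lower token) := by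
  simp only [has_bad_token_py_alt, List.any_eq_true]
  constructor
  · rintro ⟨token, htok, hbad⟩
    refine ⟨token, htok, ?_⟩
    split_ifs at hbad with h1 h2
    · exact Or.inl ((PySem.Set.contains_iff _ _).mp h1)
    · refine Or.inr (Or.inl ?_)
      cases hget : PySem.List.pyGet? ((PySem.Str.split? (PySem.Str.lower token) "-").getD []) (0 : Int) with
      | none => rw [hget] at h2; simp at h2
      | some p =>
        rw [hget] at h2
        refine ⟨p, ?_, by simpa using h2⟩
        have h0 := hget
        have : PySem.List.pyGet? ((PySem.Str.split? (PySem.Str.lower token) "-").getD []) ((0 : Nat) : Int) =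
            ((PySem.Str.split? (PySem.Str.lower token) "-").getD [])[(0 : Nat)]? :=
          PySem.List.pyGet?_natCast _ 0
        rw [show ((0 : Nat) : Int) = (0 : Int) from rfl] at this
        rw [this] at h0
        rwa [List.head?_eq_getElem?]
    · simp only [List.any_eq_true] at hbad
      obtain ⟨p, hp, hpmem⟩ := hbad
      exact Or.inr (Or.inr ⟨p, hp, by simpa using hpmem⟩)
  · rintro ⟨token, htok, hbad⟩
    refine ⟨token, htok, ?_⟩
    rcases hbad with h | ⟨p, hp, hpmem⟩ | ⟨p, hp, hpmem⟩
    · have hcontains : PySem.Set.contains pvBadTokens (PySem.Str.lower token) = true :=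
        (PySem.Set.contains_iff _ _).mpr h
      rw [if_pos hcontains]
    · split_ifs with h1 h2
      · rfl
      · rfl
      · exfalso; apply h2
        have : PySem.List.pyGet? ((PySem.Str.split? (PySem.Str.lower token) "-").getD []) ((0 : Nat) : Int) =
            ((PySem.Str.split? (PySem.Str.lower token) "-").getD [])[(0 : Nat)]? :=
          PySem.List.pyGet?_natCast _ 0
        rw [show ((0 : Nat) : Int) = (0 : Int) from rfl] at this
        rw [this, ← List.head?_eq_getElem?, hp]
        simpa using hpmem
    · split_ifs with h1 h2
      · rfl
      · rfl
      · simp only [List.any_eq_true]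
        exact ⟨p, hp, by simpa using hpmem⟩

-- A's explicit per-token loop returns true iff some listed token is bad (ignores the BAD_TOKENS clause)
theorem loop_iff (l : List String) :
    has_bad_token_py_loop l = true ↔
      ∃ t ∈ l, ((∃ p, ((PySem.Str.split? t "-").getD []).head? = some p ∧
          p ∈ (["ad", "ads", "advert", "promo"] : List String)) ∨
        (∃ p ∈ (PySem.Str.split? t "-").getD [],
          p ∈ (["related", "newsletter", "paywall", "sponsored", "taboola",
                "outbrain", "recommend", "share", "social-share"] : List String))) := by
  induction l with
  | nil => simp [has_bad_token_py_loop]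
  | cons t rest ih =>
    simp only [has_bad_token_py_loop]
    split_ifs with h1 h2
    · simp only [List.any_eq_true] at h1
      obtain ⟨ip, hip, hcond⟩ := h1
      simp only [Bool.and_eq_true, beq_iff_eq] at hcond
      obtain ⟨hmem, hzero⟩ := hcond
      obtain ⟨k, hk, rfl⟩ := (PySem.List.mem_enumerate_iff _ _ _).mp hip
      have hk0 : k = 0 := by
        have : (0 : Int) + (k : Int) = 0 := hzero
        omega
      subst hk0
      constructor
      · intro _
        refine ⟨t, by simp, Or.inl ⟨((PySem.Str.split? t "-").getD [])[0], ?_, ?_⟩⟩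
        · simp [List.head?_eq_getElem?, hk]
        · simpa [PySem.Set.contains_iff, PySem.Set.mem_ofList] using hmem
      · intro _; rfl
    · constructor
      · intro _
        simp only [List.any_eq_true] at h2
        obtain ⟨bad, hbadmem, hbadin⟩ := h2
        exact ⟨t, by simp, Or.inr ⟨bad, by simpa using hbadin, hbadmem⟩⟩
      · intro _; rfl
    · rw [ih]
      constructor
      · rintro ⟨u, hu, hbad⟩
        exact ⟨u, by simp [hu], hbad⟩
      · rintro ⟨u, hu, hbad⟩
        rcases List.mem_cons.mp hu with rfl | hu'
        · exfalso
          rcases hbad with ⟨p, hp, hpmem⟩ | ⟨p, hp, hpmem⟩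
          · apply h1
            simp only [List.any_eq_true]
            cases hparts : (PySem.Str.split? u "-").getD [] with
            | nil => rw [hparts] at hp; simp at hp
            | cons q qs =>
              rw [hparts] at hp
              simp only [List.head?_cons, Option.some.injEq] at hp
              subst hp
              refine ⟨((0 : Int), q), ?_, ?_⟩
              · rw [PySem.List.enumerate_cons]
                simp
              · simp only [Bool.and_eq_true, beq_iff_eq]
                refine ⟨?_, by trivial⟩
                simp only [PySem.Set.contains_eq_listContains]
                simpa using hpmem
          · apply h2
            simp only [List.any_eq_true]
            exact ⟨p, hpmem, by simpa using hp⟩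
        · exact ⟨u, hu', hbad⟩

-- membership in the set built by A's _token_set fold
theorem mem_token_fold (l : List String) : ∀ (init : PySem.Set String) (x : String),
    (x ∈ l.foldl (fun out token =>
        let token := PySem.Str.lower (PySem.Str.strip token)
        if token ≠ "" then PySem.Set.add out token else out) init) ↔
      (x ∈ init ∨ ∃ token ∈ l, PySem.Str.lower (PySem.Str.strip token) = x ∧
        PySem.Str.lower (PySem.Str.strip token) ≠ "") := by
  induction l with
  | nil => simp
  | cons t rest ih =>
    intro init x
    simp only [List.foldl_cons]
    rw [ih]
    by_cases h : PySem.Str.lower (PySem.Str.strip t) ≠ ""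
    · simp only [if_pos h, PySem.Set.mem_add]
      constructor
      · rintro (⟨hi | hx⟩ | ⟨u, hu, hux, hune⟩)
        · exact Or.inl hi
        · exact Or.inr ⟨t, by simp, hx.symm, h⟩
        · exact Or.inr ⟨u, by simp [hu], hux, hune⟩
      · rintro (hi | ⟨u, hu, hux, hune⟩)
        · exact Or.inl (Or.inl hi)
        · rcases List.mem_cons.mp hu with rfl | hu'
          · exact Or.inl (Or.inr hux.symm)
          · exact Or.inr ⟨u, hu', hux, hune⟩
    · simp only [if_neg h]
      constructor
      · rintro (hi | ⟨u, hu, hux, hune⟩)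
        · exact Or.inl hi
        · exact Or.inr ⟨u, by simp [hu], hux, hune⟩
      · rintro (hi | ⟨u, hu, hux, hune⟩)
        · exact Or.inl hi
        · rcases List.mem_cons.mp hu with rfl | hu'
          · exact absurd hune h
          · exact Or.inr ⟨u, hu', hux, hune⟩

-- lower of a nonempty string is nonempty
theorem lower_ne_empty (s : String) (h : s ≠ "") : PySem.Str.lower s ≠ "" := by
  intro hc
  apply h
  have h2 := congrArg String.toList hc
  rw [PySem.Str.toList_lower] at h2
  simpa [PySem.Chars.lower] using h2

-- characterisation of A's token set: exactly the lowercased split tokens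
theorem mem_token_set (value : String) (x : String) :
    x ∈ token_set_py value ↔ ∃ token ∈ PySem.Str.split₀ value, PySem.Str.lower token = x := by
  simp only [token_set_py]
  by_cases hv : value == ""
  · rw [if_pos hv]
    have hv' : value = "" := by simpa using hv
    subst hv'
    simp [PySem.Set.empty, PySem.Str.split₀, PySem.Chars.split₀, PySem.Chars.split₀.go]
  · rw [if_neg (by simpa using hv)]
    rw [mem_token_fold]
    simp only [PySem.Set.empty, List.not_mem_nil, false_or]
    constructor
    · rintro ⟨token, htok, hx, _⟩
      obtain ⟨hstrip, _⟩ := mem_strSplit₀ value token htok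
      exact ⟨token, htok, by rwa [hstrip] at hx⟩
    · rintro ⟨token, htok, hx⟩
      obtain ⟨hstrip, hne⟩ := mem_strSplit₀ value token htok
      exact ⟨token, htok, by rwa [hstrip], by rw [hstrip]; exact lower_ne_empty token hne⟩

-- A returns true iff some split token is bad after lowercasing
theorem a_iff (value : String) :
    has_bad_token_py value = true ↔
      ∃ token ∈ PySem.Str.split₀ value, pvTokBad (PySem.Str.lower token) := by
  simp only [has_bad_token_py]
  by_cases hv : value == ""
  · rw [if_pos hv]
    have hv' : value = "" := by simpa using hv
    subst hv'
    simp [PySem.Str.split₀, PySem.Chars.split₀, PySem.Chars.split₀.go]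
  · rw [if_neg (by simpa using hv)]
    split_ifs with hint
    · have hne : PySem.Set.inter (token_set_py value) pvBadTokens ≠ [] := by
        intro hc
        rw [hc] at hint
        simp at hint
      have hex : ∃ x ∈ token_set_py value, x ∈ pvBadTokens := by
        rcases List.exists_mem_of_ne_nil _ hne with ⟨x, hx⟩
        exact ⟨x, ((PySem.Set.mem_inter _ _ _).mp hx).1, ((PySem.Set.mem_inter _ _ _).mp hx).2⟩
      obtain ⟨x, hxs, hxb⟩ := hex
      obtain ⟨token, htok, rfl⟩ := (mem_token_set value x).mp hxs
      exact ⟨fun _ => ⟨token, htok, Or.inl hxb⟩, fun _ => rfl⟩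
    · rw [loop_iff]
      constructor
      · rintro ⟨t, ht, hbad⟩
        obtain ⟨token, htok, rfl⟩ := (mem_token_set value t).mp ht
        exact ⟨token, htok, Or.inr hbad⟩
      · rintro ⟨token, htok, hbad⟩
        rcases hbad with hb | hb
        · exfalso
          apply hint
          have hmem : PySem.Str.lower token ∈ PySem.Set.inter (token_set_py value) pvBadTokens :=
            (PySem.Set.mem_inter _ _ _).mpr ⟨(mem_token_set value _).mpr ⟨token, htok, rfl⟩, hb⟩
          cases h : PySem.Set.inter (token_set_py value) pvBadTokens with
          | nil => rw [h] at hmem; simp at hmem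
          | cons a b => simp
        · exact ⟨PySem.Str.lower token, (mem_token_set value _).mpr ⟨token, htok, rfl⟩, hb⟩

-- ===== VERDICT (by name: the statement is the Claim_ definition above) =====
theorem has_bad_token_py_spec : Claim_equal_has_bad_token_py := by
  intro value _
  unfold Spec_has_bad_token_py
  have h := (a_iff value).trans (alt_iff value).symm
  cases ha : has_bad_token_py value <;> cases hb : has_bad_token_py_alt value <;> simp_all
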